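-- pv_equiv track=rewrite | github.com/megatrommendes/MegaPetz | Model/DAO/FuncoesAuxiliares/FormataRG.py | formata_rg
-- ===== SOURCE A (Python) =====
-- def formata_rg(text):
--     # Remove caracteres não numéricos
--     text = ''.join(filter(str.isdigit, text))
--     if len(text) > 14:
--         # Limita o tamanho do texto
--         text = text[:14]
--     formatted_text = ''
--     for i in range(len(text)):
--         if i == 2:
--             formatted_text += '.' + text[i]
--         elif i == 5:
--             formatted_text += '.' + text[i]
--         elif i == 8:
--             formatted_text += '-' + text[i]
--         else:
--             formatted_text += text[i]
--     return formatted_text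
-- ===== SOURCE B (Python) =====
-- def formata_rg(text):
--     digits = ''.join(c for c in text if c.isdigit())[:14]
--     parts = [digits[:2]]
--     if len(digits) > 2:
--         parts.append('.' + digits[2:5])
--     if len(digits) > 5:
--         parts.append('.' + digits[5:8])
--     if len(digits) > 8:
--         parts.append('-' + digits[8:14])
--     return ''.join(parts)
-- ===== Notes on version B (the rewrite author's own statement) =====
-- stated objective: simpler
-- what changed: Replaces the per-character index loop with position checks by slicing the digit string into four fixed segments and joining them with separators gated on the digit count.
import Mathlib
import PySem

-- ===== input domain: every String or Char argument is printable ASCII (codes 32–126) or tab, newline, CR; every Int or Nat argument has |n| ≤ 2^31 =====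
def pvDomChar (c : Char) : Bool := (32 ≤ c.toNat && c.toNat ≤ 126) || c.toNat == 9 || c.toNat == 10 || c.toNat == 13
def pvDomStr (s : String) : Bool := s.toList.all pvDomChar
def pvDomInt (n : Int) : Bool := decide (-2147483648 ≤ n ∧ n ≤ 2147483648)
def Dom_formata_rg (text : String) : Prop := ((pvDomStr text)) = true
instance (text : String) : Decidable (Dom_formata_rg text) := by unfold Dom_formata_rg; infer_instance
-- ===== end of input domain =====

-- B replaces A's per-index loop with fixed slices joined by separators gated on the digit count (simpler decomposition, same cost).

-- ===== PORT A =====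
def formata_rg (text : String) : String :=
  let t0 := text.toList.filter PySem.Str.isdigit
  let t := if 14 < t0.length then PySem.List.slice t0 none (some 14) else t0
  let formatted := (PySem.List.pyRange 0 (t.length : Int) 1).foldl
    (fun acc i =>
      if i == 2 then acc ++ ['.', PySem.List.pyGetD t i ' ']
      else if i == 5 then acc ++ ['.', PySem.List.pyGetD t i ' ']
      else if i == 8 then acc ++ ['-', PySem.List.pyGetD t i ' ']
      else acc ++ [PySem.List.pyGetD t i ' ']) ([] : List Char)
  String.ofList formatted

-- ===== PORT B =====
def formata_rg_alt (text : String) : String :=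
  let digits := PySem.List.slice (text.toList.filter PySem.Str.isdigit) none (some 14)
  let parts := [PySem.List.slice digits none (some 2)]
  let parts := if 2 < digits.length then parts ++ ['.' :: PySem.List.slice digits (some 2) (some 5)] else parts
  let parts := if 5 < digits.length then parts ++ ['.' :: PySem.List.slice digits (some 5) (some 8)] else parts
  let parts := if 8 < digits.length then parts ++ ['-' :: PySem.List.slice digits (some 8) (some 14)] else parts
  String.ofList parts.flatten

-- ===== PRECONDITION & SPEC =====
def Spec_formata_rg (text : String) (out : String) : Prop := out = formata_rg_alt text
instance (text : String) (out : String) : Decidable (Spec_formata_rg text out) := by unfold Spec_formata_rg; infer_instance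

-- ===== CLAIM (what is proved, stated in full; the proofs are below) =====
def Claim_equal_formata_rg : Prop := ∀ (text : String), Dom_formata_rg text → Spec_formata_rg text (formata_rg text)

-- ===== LEMMAS AND PROOFS =====

-- concrete values of range(n) for the lengths a ≤14-digit list can have
lemma pr0 : PySem.List.pyRange 0 (0:Int) 1 = [] := by decide
lemma pr1 : PySem.List.pyRange 0 (1:Int) 1 = [0] := by decide
lemma pr2 : PySem.List.pyRange 0 (2:Int) 1 = [0, 1] := by decide
lemma pr3 : PySem.List.pyRange 0 (3:Int) 1 = [0, 1, 2] := by decide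
lemma pr4 : PySem.List.pyRange 0 (4:Int) 1 = [0, 1, 2, 3] := by decide
lemma pr5 : PySem.List.pyRange 0 (5:Int) 1 = [0, 1, 2, 3, 4] := by decide
lemma pr6 : PySem.List.pyRange 0 (6:Int) 1 = [0, 1, 2, 3, 4, 5] := by decide
lemma pr7 : PySem.List.pyRange 0 (7:Int) 1 = [0, 1, 2, 3, 4, 5, 6] := by decide
lemma pr8 : PySem.List.pyRange 0 (8:Int) 1 = [0, 1, 2, 3, 4, 5, 6, 7] := by decide
lemma pr9 : PySem.List.pyRange 0 (9:Int) 1 = [0, 1, 2, 3, 4, 5, 6, 7, 8] := by decide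
lemma pr10 : PySem.List.pyRange 0 (10:Int) 1 = [0, 1, 2, 3, 4, 5, 6, 7, 8, 9] := by decide
lemma pr11 : PySem.List.pyRange 0 (11:Int) 1 = [0, 1, 2, 3, 4, 5, 6, 7, 8, 9, 10] := by decide
lemma pr12 : PySem.List.pyRange 0 (12:Int) 1 = [0, 1, 2, 3, 4, 5, 6, 7, 8, 9, 10, 11] := by decide
lemma pr13 : PySem.List.pyRange 0 (13:Int) 1 = [0, 1, 2, 3, 4, 5, 6, 7, 8, 9, 10, 11, 12] := by decide
lemma pr14 : PySem.List.pyRange 0 (14:Int) 1 = [0, 1, 2, 3, 4, 5, 6, 7, 8, 9, 10, 11, 12, 13] := by decide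

-- core fact: on any digit list of length ≤ 14 A's loop and B's segment assembly agree
lemma formata_rg_core (d : List Char) (h : d.length ≤ 14) :
    ((PySem.List.pyRange 0 (d.length : Int) 1).foldl
      (fun acc i =>
        if i == 2 then acc ++ ['.', PySem.List.pyGetD d i ' ']
        else if i == 5 then acc ++ ['.', PySem.List.pyGetD d i ' ']
        else if i == 8 then acc ++ ['-', PySem.List.pyGetD d i ' ']
        else acc ++ [PySem.List.pyGetD d i ' ']) ([] : List Char)) =
    (let parts := [PySem.List.slice d none (some 2)]
     let parts := if 2 < d.length then parts ++ ['.' :: PySem.List.slice d (some 2) (some 5)] else parts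
     let parts := if 5 < d.length then parts ++ ['.' :: PySem.List.slice d (some 5) (some 8)] else parts
     let parts := if 8 < d.length then parts ++ ['-' :: PySem.List.slice d (some 8) (some 14)] else parts
     parts.flatten) := by
  rcases d with _ | ⟨a0, d⟩
  · simp only [List.length_nil]
    norm_num [pr0]
    simp [PySem.List.slice, PySem.List.clampIdx]
  rcases d with _ | ⟨a1, d⟩
  · simp only [List.length_cons, List.length_nil]
    norm_num [pr1]
    simp [PySem.List.slice, PySem.List.clampIdx]
  rcases d with _ | ⟨a2, d⟩
  · simp only [List.length_cons, List.length_nil]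
    norm_num [pr0, pr1, pr2, pr3, pr4, pr5, pr6, pr7, pr8, pr9, pr10, pr11, pr12, pr13, pr14]
    try simp [PySem.List.pyGetD, PySem.List.slice, PySem.List.clampIdx]
  rcases d with _ | ⟨a3, d⟩
  · simp only [List.length_cons, List.length_nil]
    norm_num [pr0, pr1, pr2, pr3, pr4, pr5, pr6, pr7, pr8, pr9, pr10, pr11, pr12, pr13, pr14]
    try simp [PySem.List.pyGetD, PySem.List.slice, PySem.List.clampIdx]
  rcases d with _ | ⟨a4, d⟩
  · simp only [List.length_cons, List.length_nil]
    norm_num [pr0, pr1, pr2, pr3, pr4, pr5, pr6, pr7, pr8, pr9, pr10, pr11, pr12, pr13, pr14]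
    try simp [PySem.List.pyGetD, PySem.List.slice, PySem.List.clampIdx]
  rcases d with _ | ⟨a5, d⟩
  · simp only [List.length_cons, List.length_nil]
    norm_num [pr0, pr1, pr2, pr3, pr4, pr5, pr6, pr7, pr8, pr9, pr10, pr11, pr12, pr13, pr14]
    try simp [PySem.List.pyGetD, PySem.List.slice, PySem.List.clampIdx]
  rcases d with _ | ⟨a6, d⟩
  · simp only [List.length_cons, List.length_nil]
    norm_num [pr0, pr1, pr2, pr3, pr4, pr5, pr6, pr7, pr8, pr9, pr10, pr11, pr12, pr13, pr14]
    try simp [PySem.List.pyGetD, PySem.List.slice, PySem.List.clampIdx]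
  rcases d with _ | ⟨a7, d⟩
  · simp only [List.length_cons, List.length_nil]
    norm_num [pr0, pr1, pr2, pr3, pr4, pr5, pr6, pr7, pr8, pr9, pr10, pr11, pr12, pr13, pr14]
    try simp [PySem.List.pyGetD, PySem.List.slice, PySem.List.clampIdx]
  rcases d with _ | ⟨a8, d⟩
  · simp only [List.length_cons, List.length_nil]
    norm_num [pr0, pr1, pr2, pr3, pr4, pr5, pr6, pr7, pr8, pr9, pr10, pr11, pr12, pr13, pr14]
    try simp [PySem.List.pyGetD, PySem.List.slice, PySem.List.clampIdx]
  rcases d with _ | ⟨a9, d⟩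
  · simp only [List.length_cons, List.length_nil]
    norm_num [pr0, pr1, pr2, pr3, pr4, pr5, pr6, pr7, pr8, pr9, pr10, pr11, pr12, pr13, pr14]
    try simp [PySem.List.pyGetD, PySem.List.slice, PySem.List.clampIdx]
  rcases d with _ | ⟨a10, d⟩
  · simp only [List.length_cons, List.length_nil]
    norm_num [pr0, pr1, pr2, pr3, pr4, pr5, pr6, pr7, pr8, pr9, pr10, pr11, pr12, pr13, pr14]
    try simp [PySem.List.pyGetD, PySem.List.slice, PySem.List.clampIdx]
  rcases d with _ | ⟨a11, d⟩
  · simp only [List.length_cons, List.length_nil]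
    norm_num [pr0, pr1, pr2, pr3, pr4, pr5, pr6, pr7, pr8, pr9, pr10, pr11, pr12, pr13, pr14]
    try simp [PySem.List.pyGetD, PySem.List.slice, PySem.List.clampIdx]
  rcases d with _ | ⟨a12, d⟩
  · simp only [List.length_cons, List.length_nil]
    norm_num [pr0, pr1, pr2, pr3, pr4, pr5, pr6, pr7, pr8, pr9, pr10, pr11, pr12, pr13, pr14]
    try simp [PySem.List.pyGetD, PySem.List.slice, PySem.List.clampIdx]
  rcases d with _ | ⟨a13, d⟩
  · simp only [List.length_cons, List.length_nil]
    norm_num [pr0, pr1, pr2, pr3, pr4, pr5, pr6, pr7, pr8, pr9, pr10, pr11, pr12, pr13, pr14]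
    try simp [PySem.List.pyGetD, PySem.List.slice, PySem.List.clampIdx]
  rcases d with _ | ⟨a14, d⟩
  · simp only [List.length_cons, List.length_nil]
    norm_num [pr0, pr1, pr2, pr3, pr4, pr5, pr6, pr7, pr8, pr9, pr10, pr11, pr12, pr13, pr14]
    try simp [PySem.List.pyGetD, PySem.List.slice, PySem.List.clampIdx]
  · simp only [List.length_cons] at h; omega

-- ===== VERDICT (by name: the statement is the Claim_ definition above) =====
theorem formata_rg_spec : Claim_equal_formata_rg := by
  intro text _
  unfold Spec_formata_rg formata_rg formata_rg_alt
  set l := text.toList.filter PySem.Str.isdigit with hl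
  by_cases hlen : 14 < l.length
  · simp only [hlen, if_pos]
    have hs : PySem.List.slice l none (some 14) = l.take 14 := by
      have h14 : (14:Int).toNat = 14 := rfl
      rw [PySem.List.slice_to l (by norm_num), h14]
    rw [hs]
    exact congrArg String.ofList (formata_rg_core (l.take 14) (by simp))
  · simp only [hlen, if_neg, not_false_iff]
    have hle : l.length ≤ 14 := by omega
    have hs : PySem.List.slice l none (some 14) = l := by
      have h14 : (14:Int).toNat = 14 := rfl
      rw [PySem.List.slice_to l (by norm_num), h14]
      exact List.take_of_length_le (by simpa using hle)
    rw [hs]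
    exact congrArg String.ofList (formata_rg_core l hle)
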